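-- pv_equiv track=rewrite | github.com/felinjob/Python_Programming_MOOC_2024_pt01 | parte_04/part04-38_grade_statistics/src/grade_statistics.py | grade_distribution
-- ===== SOURCE A (Python) =====
-- def grade_distribution(approveds: list, reproveds: list):
--     five = ""
--     four = ""
--     three = ""
--     two = ""
--     one = ""
--     zero = "*" * len(reproveds)
--     for i in approveds:
--         if i >= 28:
--             five += "*"
--         elif i >= 24:
--             four += "*"
--         elif i >= 21:
--             three += "*"
--         elif i >= 18:
--             two += "*"
--         elif i >= 15:
--             one += "*"
--     return (f"  5: {five} \n  4: {four} \n  3: {three} \n  2: {two} \n  1: {one} \n  0: {zero}")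
-- ===== SOURCE B (Python) =====
-- def grade_distribution(approveds: list, reproveds: list):
--     thresholds = [15, 18, 21, 24, 28]
--     counts = [len(reproveds), 0, 0, 0, 0, 0]
--     for g in approveds:
--         level = sum(1 for t in thresholds if g >= t)
--         if level:
--             counts[level] += 1
--     lines = [f"  {k}: {'*' * counts[k]} " for k in range(5, 0, -1)]
--     lines.append(f"  0: {'*' * counts[0]}")
--     return "\n".join(lines)
-- ===== Notes on version B (the rewrite author's own statement) =====
-- stated objective: alternative
-- what changed: B maintains a single list of six integer counts with the level of each grade computed from a thresholds table [15,18,21,24,28] (level = number of thresholds <= grade), rendering the star strings only once at the end, instead of A's if-elif ladder growing five separate star strings.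
import Mathlib
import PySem

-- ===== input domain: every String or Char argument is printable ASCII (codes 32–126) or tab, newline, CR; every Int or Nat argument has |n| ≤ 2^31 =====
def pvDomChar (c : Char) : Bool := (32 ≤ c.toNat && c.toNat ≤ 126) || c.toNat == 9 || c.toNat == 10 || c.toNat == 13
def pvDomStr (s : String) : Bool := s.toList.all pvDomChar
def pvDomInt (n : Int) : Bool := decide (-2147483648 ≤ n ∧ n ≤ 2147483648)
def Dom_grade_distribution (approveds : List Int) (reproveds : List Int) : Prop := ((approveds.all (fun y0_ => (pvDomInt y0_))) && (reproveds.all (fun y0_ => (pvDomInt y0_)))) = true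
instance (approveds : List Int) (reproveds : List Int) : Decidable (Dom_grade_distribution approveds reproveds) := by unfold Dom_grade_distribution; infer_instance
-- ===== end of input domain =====

-- B replaces A's five star-string accumulators and if-elif ladder by a table-driven
-- list of six counts (level = number of thresholds ≤ grade), formatting at the end (objective: alternative).


-- ===== PORT A =====
-- A's loop state: the five star strings (five, four, three, two, one), kept as List Char
-- (PySem string functions are defined on List Char; the result is wrapped with String.mk once).
def gdA_step (s : List Char × List Char × List Char × List Char × List Char) (i : Int) :
    List Char × List Char × List Char × List Char × List Char :=
  if i ≥ 28 then (s.1 ++ ['*'], s.2.1, s.2.2.1, s.2.2.2.1, s.2.2.2.2)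
  else if i ≥ 24 then (s.1, s.2.1 ++ ['*'], s.2.2.1, s.2.2.2.1, s.2.2.2.2)
  else if i ≥ 21 then (s.1, s.2.1, s.2.2.1 ++ ['*'], s.2.2.2.1, s.2.2.2.2)
  else if i ≥ 18 then (s.1, s.2.1, s.2.2.1, s.2.2.2.1 ++ ['*'], s.2.2.2.2)
  else if i ≥ 15 then (s.1, s.2.1, s.2.2.1, s.2.2.2.1, s.2.2.2.2 ++ ['*'])
  else s

def grade_distribution (approveds : List Int) (reproveds : List Int) : String :=
  let zero : List Char := PySem.List.pyRepeat ['*'] (reproveds.length : Int)  -- "*" * len(reproveds)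
  let st := approveds.foldl gdA_step ([], [], [], [], [])
  String.mk ("  5: ".toList ++ st.1 ++ " \n  4: ".toList ++ st.2.1 ++ " \n  3: ".toList ++
    st.2.2.1 ++ " \n  2: ".toList ++ st.2.2.2.1 ++ " \n  1: ".toList ++ st.2.2.2.2 ++
    " \n  0: ".toList ++ zero)

-- ===== PORT B =====
-- level = sum(1 for t in thresholds if g >= t)
def gd_level (g : Int) : Nat :=
  ([15, 18, 21, 24, 28] : List Int).foldl (fun acc t => if g ≥ t then acc + 1 else acc) 0

def gdB_step (counts : List Nat) (g : Int) : List Nat :=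
  let level := gd_level g
  if level ≠ 0 then counts.modify level (· + 1) else counts

def grade_distribution_alt (approveds : List Int) (reproveds : List Int) : String :=
  let counts := approveds.foldl gdB_step [reproveds.length, 0, 0, 0, 0, 0]
  let lines := (PySem.List.pyRange 5 0 (-1)).map (fun k =>
    "  ".toList ++ PySem.Int.toChars k ++ ": ".toList ++
      PySem.List.pyRepeat ['*'] (PySem.List.pyGetD counts k 0 : Int) ++ [' '])
  let lines := lines ++ ["  0: ".toList ++ PySem.List.pyRepeat ['*'] (PySem.List.pyGetD counts 0 0 : Int)]
  String.mk (PySem.Chars.join ['\n'] lines)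

-- ===== PRECONDITION & SPEC =====
def Spec_grade_distribution (approveds : List Int) (reproveds : List Int) (out : String) : Prop := out = grade_distribution_alt approveds reproveds
instance (approveds : List Int) (reproveds : List Int) (out : String) : Decidable (Spec_grade_distribution approveds reproveds out) := by unfold Spec_grade_distribution; infer_instance

-- ===== CLAIM (what is proved, stated in full; the proofs are below) =====
def Claim_equal_grade_distribution : Prop := ∀ (approveds : List Int) (reproveds : List Int), Dom_grade_distribution approveds reproveds → Spec_grade_distribution approveds reproveds (grade_distribution approveds reproveds)

-- ===== LEMMAS AND PROOFS =====
def n5 (l : List Int) : Nat := l.countP (fun i => decide (28 ≤ i))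
def n4 (l : List Int) : Nat := l.countP (fun i => decide (24 ≤ i ∧ i < 28))
def n3 (l : List Int) : Nat := l.countP (fun i => decide (21 ≤ i ∧ i < 24))
def n2 (l : List Int) : Nat := l.countP (fun i => decide (18 ≤ i ∧ i < 21))
def n1 (l : List Int) : Nat := l.countP (fun i => decide (15 ≤ i ∧ i < 18))

lemma A_loop (l : List Int) : ∀ (s5 s4 s3 s2 s1 : List Char),
    l.foldl gdA_step (s5, s4, s3, s2, s1) =
      (s5 ++ List.replicate (n5 l) '*', s4 ++ List.replicate (n4 l) '*',
       s3 ++ List.replicate (n3 l) '*', s2 ++ List.replicate (n2 l) '*',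
       s1 ++ List.replicate (n1 l) '*') := by
  induction l with
  | nil => intro s5 s4 s3 s2 s1; simp [n5, n4, n3, n2, n1]
  | cons i t ih =>
    intro s5 s4 s3 s2 s1
    simp only [List.foldl_cons, gdA_step]
    split_ifs with h1 h2 h3 h4 h5 <;>
      rw [ih] <;>
      simp only [n5, n4, n3, n2, n1, List.countP_cons, decide_eq_true_eq] <;>
      split_ifs <;>
      first
        | (exfalso; omega)
        | simp [List.replicate_succ, List.append_assoc]

lemma gd_level_eq (i : Int) : gd_level i =
    (if 28 ≤ i then 5 else if 24 ≤ i then 4 else if 21 ≤ i then 3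
     else if 18 ≤ i then 2 else if 15 ≤ i then 1 else 0 : Nat) := by
  simp only [gd_level, List.foldl]
  split_ifs <;> omega

lemma modify6 (c0 c1 c2 c3 c4 c5 : Nat) (f : Nat → Nat) :
    ([c0, c1, c2, c3, c4, c5].modify 1 f = [c0, f c1, c2, c3, c4, c5]) ∧
    ([c0, c1, c2, c3, c4, c5].modify 2 f = [c0, c1, f c2, c3, c4, c5]) ∧
    ([c0, c1, c2, c3, c4, c5].modify 3 f = [c0, c1, c2, f c3, c4, c5]) ∧
    ([c0, c1, c2, c3, c4, c5].modify 4 f = [c0, c1, c2, c3, f c4, c5]) ∧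
    ([c0, c1, c2, c3, c4, c5].modify 5 f = [c0, c1, c2, c3, c4, f c5]) :=
  ⟨rfl, rfl, rfl, rfl, rfl⟩

lemma B_loop (l : List Int) : ∀ (c0 c1 c2 c3 c4 c5 : Nat),
    l.foldl gdB_step [c0, c1, c2, c3, c4, c5] =
      [c0, c1 + n1 l, c2 + n2 l, c3 + n3 l, c4 + n4 l, c5 + n5 l] := by
  induction l with
  | nil => intro c0 c1 c2 c3 c4 c5; simp [n5, n4, n3, n2, n1]
  | cons i t ih =>
    intro c0 c1 c2 c3 c4 c5
    simp only [List.foldl_cons, gdB_step, gd_level_eq]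
    split_ifs <;>
      first
        | (exfalso; omega)
        | ((first
             | rw [(modify6 c0 c1 c2 c3 c4 c5 _).1]
             | rw [(modify6 c0 c1 c2 c3 c4 c5 _).2.1]
             | rw [(modify6 c0 c1 c2 c3 c4 c5 _).2.2.1]
             | rw [(modify6 c0 c1 c2 c3 c4 c5 _).2.2.2.1]
             | rw [(modify6 c0 c1 c2 c3 c4 c5 _).2.2.2.2]
             | skip)
           rw [ih]
           simp only [n5, n4, n3, n2, n1, List.countP_cons, decide_eq_true_eq]
           split_ifs <;>
             first
               | (exfalso; omega)
               | (simp only [List.cons.injEq, true_and, and_true]; omega))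

-- ===== VERDICT (by name: the statement is the Claim_ definition above) =====
theorem grade_distribution_spec : Claim_equal_grade_distribution := by
  intro approveds reproveds _
  unfold Spec_grade_distribution grade_distribution grade_distribution_alt
  rw [A_loop, B_loop]
  have hr : PySem.List.pyRange 5 0 (-1) = [5, 4, 3, 2, 1] := by decide
  rw [hr]
  simp [PySem.List.pyGetD, PySem.List.pyGet?, PySem.List.pyIdx?, PySem.List.pyRepeat_singleton,
    PySem.Chars.join, PySem.Int.toChars, List.intercalate, List.intersperse, Nat.toDigits,
    Nat.toDigitsCore, Nat.digitChar, List.append_assoc]
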